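-- pv_equiv track=rewrite | github.com/yzzupgo/FL | code/sbfl/command.py | GetTouleList
-- ===== SOURCE A (Python) =====
-- def GetTouleList(res, cov_all):
--     touple_all = {}
--     for cov in cov_all:
--         if not cov:
--             continue
--         for line in cov:
--             if line not in touple_all:
--                 touple_all[line] = [0, 0, 0, 0]
--             # ef,ep,nf,np
--
--     for i, cov in enumerate(cov_all):
--         if not cov:
--             continue
--         for key in touple_all:
--             A = 1 if res[i] else 0
--             if not key in cov:
--                 A += 2
--             touple_all[key][A] += 1
--     return touple_all
-- ===== SOURCE B (Python) =====
-- def GetTouleList(res, cov_all):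
--     # One pass over the coverage records: per line count only the covered
--     # (fail-slot, pass-slot) occurrences; not-covered counts come from totals.
--     counts = {}            # line -> [covered&falsy, covered&truthy]
--     totals = [0, 0]        # [falsy covs, truthy covs] among non-empty covs
--     for i, cov in enumerate(cov_all):
--         if not cov:
--             continue
--         r = 1 if res[i] else 0
--         totals[r] += 1
--         for line in dict.fromkeys(cov):
--             v = counts.get(line, [0, 0])
--             v[r] += 1
--             counts[line] = v
--     return {k: [v[0], v[1], totals[0] - v[0], totals[1] - v[1]]
--             for k, v in counts.items()}
-- ===== Notes on version B (the rewrite author's own statement) =====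
-- stated objective: faster
-- what changed: A pre-seeds a dict of all covered lines and then, for every coverage record, walks every known line testing membership in the record (O(records*lines*|cov|)); B makes one pass that touches only each record's own (deduplicated) covered lines, keeping per-line [covered&fail, covered&pass] counts plus global pass/fail totals, and derives the not-covered slots as totals minus covered at the end.
import Mathlib
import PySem

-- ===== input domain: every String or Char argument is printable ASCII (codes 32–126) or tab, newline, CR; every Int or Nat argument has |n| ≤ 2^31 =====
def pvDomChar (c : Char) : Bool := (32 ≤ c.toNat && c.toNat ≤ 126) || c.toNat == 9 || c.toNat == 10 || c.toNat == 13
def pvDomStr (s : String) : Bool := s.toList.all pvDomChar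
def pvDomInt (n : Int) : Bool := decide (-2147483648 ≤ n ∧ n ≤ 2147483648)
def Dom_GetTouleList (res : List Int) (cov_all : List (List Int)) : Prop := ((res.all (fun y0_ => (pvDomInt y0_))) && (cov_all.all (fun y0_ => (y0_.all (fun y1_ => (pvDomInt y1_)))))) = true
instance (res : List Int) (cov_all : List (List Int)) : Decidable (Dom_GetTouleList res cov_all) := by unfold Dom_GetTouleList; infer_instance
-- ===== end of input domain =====

-- B replaces A's two-pass scheme (pre-seed every line, then for EVERY record walk EVERY known
-- line with a membership test) by a single pass that touches only the covered lines of each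
-- record and derives the not-covered counts from per-result totals at the end.


-- ===== PORT A =====
-- Literal port of A: first pass seeds touple_all[line] = [0,0,0,0] for every covered line;
-- second pass walks, for every non-empty record, ALL keys of the dict, adjusting slot
-- A = (1 if res[i] else 0) + (2 if key not in cov).  touple_all[key][A] += 1 is ported as
-- set/getD on the 4-element value list (the slot always exists).
def GetTouleList (res : List Int) (cov_all : List (List Int)) : List (Int × List Int) :=
  let t0 : PySem.Dict Int (List Int) :=
    cov_all.foldl (fun d cov =>
      if cov = [] then d
      else cov.foldl (fun d line =>
        if !(d.contains line) then d.insert line [0, 0, 0, 0] else d) d)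
      (PySem.Dict.mk [])
  let t1 : PySem.Dict Int (List Int) :=
    (PySem.List.enumerate cov_all).foldl (fun d p =>
      if p.2 = [] then d
      else d.keys.foldl (fun d key =>
        let a : Nat := if (PySem.List.pyGet? res p.1).getD 0 ≠ 0 then 1 else 0
        let a : Nat := if !(decide (key ∈ p.2)) then a + 2 else a
        d.modify key [] (fun v => v.set a (v.getD a 0 + 1))) d) t0
  t1.items

-- ===== PORT B =====
-- Literal port of B (Source B): one fold over enumerate(cov_all) maintaining
-- counts : line -> [covered&falsy, covered&truthy] (inner loop over dict.fromkeys(cov),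
-- ported as PySem.List.dedup) and totals = [falsy, truthy] among non-empty records;
-- the final comprehension derives the not-covered slots from the totals.
def GetTouleList_alt (res : List Int) (cov_all : List (List Int)) : List (Int × List Int) :=
  let st : PySem.Dict Int (List Int) × List Int :=
    (PySem.List.enumerate cov_all).foldl (fun st p =>
      if p.2 = [] then st
      else
        let r : Nat := if (PySem.List.pyGet? res p.1).getD 0 ≠ 0 then 1 else 0
        let totals := st.2.set r (st.2.getD r 0 + 1)
        let counts := (PySem.List.dedup p.2).foldl (fun c line =>
          let v := c.getD line [0, 0]
          c.insert line (v.set r (v.getD r 0 + 1))) st.1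
        (counts, totals))
      (PySem.Dict.mk [], [0, 0])
  st.1.items.map (fun kv =>
    (kv.1, [kv.2.getD 0 0, kv.2.getD 1 0,
            st.2.getD 0 0 - kv.2.getD 0 0, st.2.getD 1 0 - kv.2.getD 1 0]))

-- ===== PRECONDITION & SPEC =====
-- A evaluates res[i] for every index i whose coverage record is non-empty; Pre_ excludes
-- exactly the inputs where that raises IndexError (res too short at such an i).
def Pre_GetTouleList (res : List Int) (cov_all : List (List Int)) : Prop :=
  ∀ i ∈ List.range cov_all.length, cov_all.getD i [] ≠ [] → i < res.length
instance (res : List Int) (cov_all : List (List Int)) : Decidable (Pre_GetTouleList res cov_all) := by unfold Pre_GetTouleList; infer_instance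
def pvWitness_GetTouleList : List Int × List (List Int) := ([1], [[2]])
def Spec_GetTouleList (res : List Int) (cov_all : List (List Int)) (out : List (Int × List Int)) : Prop := out = GetTouleList_alt res cov_all
instance (res : List Int) (cov_all : List (List Int)) (out : List (Int × List Int)) : Decidable (Spec_GetTouleList res cov_all out) := by unfold Spec_GetTouleList; infer_instance

-- ===== CLAIM =====
def Claim_equal_GetTouleList : Prop := ∀ (res : List Int) (cov_all : List (List Int)), Dom_GetTouleList res cov_all → Pre_GetTouleList res cov_all → Spec_GetTouleList res cov_all (GetTouleList res cov_all)

-- ===== LEMMAS AND PROOFS =====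

def cdict (S : List Int) (g : Int → List Int) : PySem.Dict Int (List Int) :=
  PySem.Dict.mk (S.map (fun k => (k, g k)))

lemma find?_beq (xs : List Int) (k : Int) :
    List.find? (fun x => x == k) xs = if k ∈ xs then some k else none := by
  induction xs with
  | nil => simp
  | cons a l ih =>
    by_cases h : a = k
    · subst h; simp
    · have hb : (a == k) = false := by simp [h]
      have hka : ¬ (k = a) := fun hh => h hh.symm
      simp [hb, ih, hka]

lemma cdict_keys (S : List Int) (g : Int → List Int) : (cdict S g).keys = S := by
  show List.map _ (S.map _) = S
  rw [List.map_map]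
  have h : ∀ x ∈ S, ((fun p : Int × List Int => p.1) ∘ fun k => (k, g k)) x = id x :=
    fun _ _ => rfl
  rw [List.map_congr_left h, List.map_id]

lemma cdict_contains (S : List Int) (g : Int → List Int) (k : Int) :
    (cdict S g).contains k = decide (k ∈ S) := by
  show List.any (S.map _) _ = decide (k ∈ S)
  rw [List.any_map]
  show S.any (fun x => x == k) = decide (k ∈ S)
  simp [List.any_beq']

lemma cdict_getD (S : List Int) (g : Int → List Int) (k : Int) (d0 : List Int) :
    (cdict S g).getD k d0 = if k ∈ S then g k else d0 := by
  simp only [cdict, PySem.Dict.getD, PySem.Dict.get?, List.find?_map]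
  have : ((fun p : Int × List Int => p.1 == k) ∘ fun x => (x, g x)) = fun x => x == k := rfl
  rw [this, find?_beq]
  split <;> simp

lemma cdict_congr {S : List Int} {g g' : Int → List Int} (h : ∀ k ∈ S, g k = g' k) :
    cdict S g = cdict S g' := by
  unfold cdict
  exact congrArg _ (List.map_congr_left fun k hk => by rw [h k hk])

lemma cdict_insert_of_not_mem {S : List Int} {k : Int} (g : Int → List Int) (v : List Int)
    (h : k ∉ S) :
    (cdict S g).insert k v = cdict (S ++ [k]) (fun x => if x = k then v else g x) := by
  apply PySem.Dict.ext
  rw [PySem.Dict.items_insert_of_not_contains]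
  · simp only [cdict, List.map_append, List.map_cons, List.map_nil]
    congr 1
    exact List.map_congr_left fun x hx => by
      have : x ≠ k := fun hh => h (hh ▸ hx)
      simp [this]
  · rw [cdict_contains]; simpa using h

lemma cdict_insert_of_mem {S : List Int} {k : Int} (g : Int → List Int) (v : List Int)
    (h : k ∈ S) :
    (cdict S g).insert k v = cdict S (fun x => if x = k then v else g x) := by
  apply PySem.Dict.ext
  rw [PySem.Dict.items_insert_of_contains]
  · simp only [cdict, List.map_map]
    exact List.map_congr_left fun x _ => by
      by_cases hx : x = k
      · subst hx; simp
      · simp [hx, Function.comp]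
  · rw [cdict_contains]; simpa using h

lemma update_ofList (S : List Int) (xs : List Int) :
    PySem.Set.update S (PySem.Set.ofList xs) = PySem.Set.update S xs := by
  induction xs using List.reverseRecOn with
  | nil => simp [PySem.Set.ofList_nil]
  | append_singleton l x ih =>
    rw [PySem.Set.ofList_append_singleton, PySem.Set.update_append,
      PySem.Set.update_cons, PySem.Set.update_nil]
    by_cases hx : x ∈ PySem.Set.ofList l
    · rw [PySem.Set.add_of_mem hx, ih,
        PySem.Set.add_of_mem (by
          have hxl : x ∈ l := (PySem.Set.mem_ofList _ _).mp hx
          exact (PySem.Set.mem_update _ _ _).mpr (Or.inr hxl))]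
    · rw [PySem.Set.add_of_not_mem hx, PySem.Set.update_append, ih,
        PySem.Set.update_cons, PySem.Set.update_nil]

lemma foldInit (c : List Int) (ls : List Int) : ∀ (S : List Int) (g : Int → List Int),
    ls.foldl (fun d line => if !(d.contains line) then d.insert line c else d) (cdict S g)
      = cdict (PySem.Set.update S ls) (fun k => if k ∈ S then g k else c) := by
  induction ls with
  | nil => intro S g; simp [PySem.Set.update_nil]; exact cdict_congr (fun k hk => by simp [hk])
  | cons x ls ih =>
    intro S g
    simp only [List.foldl_cons, cdict_contains, PySem.Set.update_cons]
    by_cases hx : x ∈ S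
    · rw [if_neg (by simp [hx]), PySem.Set.add_of_mem hx, ih]
    · rw [if_pos (by simp [hx]), cdict_insert_of_not_mem g c hx,
        PySem.Set.add_of_not_mem hx, ih]
      exact cdict_congr (fun k hk => by
        by_cases hks : k ∈ S ++ [x]
        · rcases List.mem_append.mp hks with h1 | h2
          · have : k ≠ x := fun hh => hx (hh ▸ h1)
            simp [hks, h1, this]
          · have : k = x := by simpa using h2
            subst this
            simp [hks, hx]
        · have h1 : k ∉ S := fun hh => hks (List.mem_append.mpr (Or.inl hh))
          have h2 : k ≠ x := fun hh => hks (by simp [hh])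
          simp [hks, h1])

lemma foldModify (f : Int → List Int → List Int) (ks : List Int) :
    ∀ (g : Int → List Int) (S : List Int), ks.Nodup → (∀ k ∈ ks, k ∈ S) →
    ks.foldl (fun d k => d.modify k [] (f k)) (cdict S g)
      = cdict S (fun k => if k ∈ ks then f k (g k) else g k) := by
  induction ks with
  | nil => intro g S _ _; simp
  | cons x ks ih =>
    intro g S hnd hsub
    have hxS : x ∈ S := hsub x (by simp)
    have hxks : x ∉ ks := (List.nodup_cons.mp hnd).1
    have hstep : (cdict S g).modify x [] (f x) = (cdict S g).insert x (f x (g x)) := by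
      simp only [PySem.Dict.modify, cdict_getD, if_pos hxS]
    rw [List.foldl_cons, hstep, cdict_insert_of_mem g (f x (g x)) hxS,
      ih _ S (List.nodup_cons.mp hnd).2 (fun k hk => hsub k (by simp [hk]))]
    exact cdict_congr (fun k hk => by
      by_cases hk1 : k ∈ ks
      · have : k ≠ x := fun hh => hxks (hh ▸ hk1)
        simp [hk1, this]
      · by_cases hk2 : k = x
        · subst hk2; simp [hk1]
        · simp [hk1, hk2])

lemma foldIns (r : Nat) (ls : List Int) :
    ∀ (S : List Int) (g : Int → List Int), ls.Nodup →
    ls.foldl (fun c line =>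
        c.insert line ((c.getD line [0, 0]).set r ((c.getD line [0, 0]).getD r 0 + 1))) (cdict S g)
      = cdict (PySem.Set.update S ls)
          (fun k => if k ∈ ls then
              ((if k ∈ S then g k else [0, 0]).set r ((if k ∈ S then g k else [0, 0]).getD r 0 + 1))
            else g k) := by
  induction ls with
  | nil =>
    intro S g _
    simp only [List.foldl_nil, PySem.Set.update_nil]
    exact cdict_congr (fun k hk => by simp)
  | cons x ls ih =>
    intro S g hnd
    have hxls : x ∉ ls := (List.nodup_cons.mp hnd).1
    rw [List.foldl_cons, PySem.Set.update_cons]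
    by_cases hx : x ∈ S
    · rw [cdict_getD, if_pos hx, cdict_insert_of_mem, PySem.Set.add_of_mem hx,
        ih S _ (List.nodup_cons.mp hnd).2]
      · exact cdict_congr (fun k hk => by
          by_cases hk1 : k ∈ ls
          · have hkx : k ≠ x := fun hh => hxls (hh ▸ hk1)
            simp [hk1, hkx]
          · by_cases hk2 : k = x
            · subst hk2; simp [hk1, hx]
            · simp [hk1, hk2])
      · exact hx
    · rw [cdict_getD, if_neg hx, cdict_insert_of_not_mem _ _ hx,
        PySem.Set.add_of_not_mem hx, ih (S ++ [x]) _ (List.nodup_cons.mp hnd).2]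
      exact cdict_congr (fun k hk => by
        by_cases hk1 : k ∈ ls
        · have hkx : k ≠ x := fun hh => hxls (hh ▸ hk1)
          by_cases hkS : k ∈ S
          · simp [hk1, hkx, hkS]
          · have : k ∉ S ++ [x] := by simp [hkS, hkx]
            simp [hk1, hkx, hkS, this]
        · by_cases hk2 : k = x
          · subst hk2; simp [hk1, hx]
          · simp [hk1, hk2])

def rOf (res : List Int) (i : Int) : Nat :=
  if (PySem.List.pyGet? res i).getD 0 ≠ 0 then 1 else 0

def aOf (res : List Int) (k : Int) (p : Int × List Int) : Nat :=
  if !(decide (k ∈ p.2)) then rOf res p.1 + 2 else rOf res p.1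

def cntA (res : List Int) (k : Int) (a : Nat) (P : List (Int × List Int)) : Int :=
  (P.countP (fun p => !p.2.isEmpty && (aOf res k p == a)) : Int)

def valA (res : List Int) (k : Int) (P : List (Int × List Int)) : List Int :=
  [cntA res k 0 P, cntA res k 1 P, cntA res k 2 P, cntA res k 3 P]

def cntB (res : List Int) (k : Int) (r : Nat) (P : List (Int × List Int)) : Int :=
  (P.countP (fun p => !p.2.isEmpty && decide (k ∈ p.2) && (rOf res p.1 == r)) : Int)

def totB (res : List Int) (r : Nat) (P : List (Int × List Int)) : Int :=
  (P.countP (fun p => !p.2.isEmpty && (rOf res p.1 == r)) : Int)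

def keysB (P : List (Int × List Int)) : List Int :=
  PySem.Set.ofList (P.map (·.2)).flatten

lemma cntA_append (res : List Int) (k : Int) (a : Nat) (P : List (Int × List Int))
    (p : Int × List Int) :
    cntA res k a (P ++ [p]) =
      cntA res k a P + (if !p.2.isEmpty && (aOf res k p == a) then 1 else 0) := by
  simp only [cntA, List.countP_append, List.countP_cons, List.countP_nil]
  split <;> simp

lemma valA_skip (res : List Int) (k : Int) (P : List (Int × List Int)) (p : Int × List Int)
    (h : p.2 = []) : valA res k (P ++ [p]) = valA res k P := by
  simp [valA, cntA_append, h]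

lemma rOf_cases (res : List Int) (i : Int) : rOf res i = 0 ∨ rOf res i = 1 := by
  unfold rOf; split <;> simp

lemma valA_step (res : List Int) (k : Int) (P : List (Int × List Int)) (p : Int × List Int)
    (h : p.2 ≠ []) :
    (valA res k P).set (aOf res k p) ((valA res k P).getD (aOf res k p) 0 + 1)
      = valA res k (P ++ [p]) := by
  have hne : p.2.isEmpty = false := by simpa using h
  by_cases hm : k ∈ p.2 <;>
    rcases rOf_cases res p.1 with hr | hr <;>
      simp [valA, aOf, hm, hr, cntA_append, hne]

lemma passA0 (cov_all : List (List Int)) :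
    cov_all.foldl (fun d cov =>
      if cov = [] then d
      else cov.foldl (fun d line =>
        if !(d.contains line) then d.insert line [0, 0, 0, 0] else d) d)
      (PySem.Dict.mk [])
    = cdict (PySem.Set.ofList cov_all.flatten) (fun _ => [0, 0, 0, 0]) := by
  have hstep : (fun (d : PySem.Dict Int (List Int)) (cov : List Int) =>
      if cov = [] then d
      else cov.foldl (fun d line =>
        if !(d.contains line) then d.insert line [0, 0, 0, 0] else d) d)
    = fun d cov => cov.foldl (fun d line =>
        if !(d.contains line) then d.insert line [0, 0, 0, 0] else d) d := by
    funext d cov; cases cov <;> simp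
  rw [hstep, ← List.foldl_flatten]
  have hinit : (PySem.Dict.mk [] : PySem.Dict Int (List Int)) = cdict [] (fun _ => [0, 0, 0, 0]) := rfl
  rw [hinit, foldInit, PySem.Set.update_nil_left]
  exact cdict_congr (fun k hk => by simp)

lemma passA (res : List Int) (K : List Int) (hK : K.Nodup) (L : List (Int × List Int)) :
    ∀ (P : List (Int × List Int)),
    L.foldl (fun d p =>
      if p.2 = [] then d
      else d.keys.foldl (fun d key =>
        let a : Nat := if (PySem.List.pyGet? res p.1).getD 0 ≠ 0 then 1 else 0
        let a : Nat := if !(decide (key ∈ p.2)) then a + 2 else a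
        d.modify key [] (fun v => v.set a (v.getD a 0 + 1))) d)
      (cdict K (fun k => valA res k P))
    = cdict K (fun k => valA res k (P ++ L)) := by
  induction L with
  | nil => intro P; simp
  | cons p L ih =>
    intro P
    rw [List.foldl_cons, List.append_cons P p L]
    by_cases hp : p.2 = []
    · rw [if_pos hp]
      have : cdict K (fun k => valA res k P) = cdict K (fun k => valA res k (P ++ [p])) :=
        cdict_congr (fun k _ => (valA_skip res k P p hp).symm)
      rw [this, ih]
    · rw [if_neg hp, cdict_keys]
      have hstep : (fun (d : PySem.Dict Int (List Int)) key =>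
          let a : Nat := if (PySem.List.pyGet? res p.1).getD 0 ≠ 0 then 1 else 0
          let a : Nat := if !(decide (key ∈ p.2)) then a + 2 else a
          d.modify key [] (fun v => v.set a (v.getD a 0 + 1)))
        = fun d key => d.modify key []
            (fun v => v.set (aOf res key p) (v.getD (aOf res key p) 0 + 1)) := rfl
      rw [hstep, foldModify _ K _ K hK (fun k hk => hk)]
      have : cdict K (fun k => if k ∈ K then
            (valA res k P).set (aOf res k p) ((valA res k P).getD (aOf res k p) 0 + 1)
          else valA res k P) = cdict K (fun k => valA res k (P ++ [p])) :=
        cdict_congr (fun k hk => by rw [if_pos hk, valA_step res k P p hp])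
      rw [this, ih]


lemma A_eq (res : List Int) (cov_all : List (List Int)) :
    GetTouleList res cov_all
      = (PySem.Set.ofList cov_all.flatten).map
          (fun k => (k, valA res k (PySem.List.enumerate cov_all))) := by
  simp only [GetTouleList]
  rw [passA0]
  have h0 : cdict (PySem.Set.ofList cov_all.flatten) (fun _ => [0, 0, 0, 0])
      = cdict (PySem.Set.ofList cov_all.flatten) (fun k => valA res k []) :=
    cdict_congr (fun k _ => by simp [valA, cntA])
  rw [h0, passA res _ (PySem.Set.nodup_ofList _) _ []]
  rfl

lemma cntB_zero (res : List Int) (k : Int) (r : Nat) (P : List (Int × List Int))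
    (h : k ∉ keysB P) : cntB res k r P = 0 := by
  have h0 : P.countP (fun p => !p.2.isEmpty && decide (k ∈ p.2) && (rOf res p.1 == r)) = 0 :=
    List.countP_eq_zero.mpr (fun p hp => by
      have hk : k ∉ p.2 := fun hm => h ((PySem.Set.mem_ofList _ _).mpr
        (List.mem_flatten.mpr ⟨p.2, List.mem_map.mpr ⟨p, hp, rfl⟩, hm⟩))
      simp [hk])
  simp [cntB, h0]

lemma keysB_append_one (P : List (Int × List Int)) (p : Int × List Int) :
    keysB (P ++ [p]) = PySem.Set.update (keysB P) p.2 := by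
  simp only [keysB, List.map_append, List.map_cons, List.map_nil, List.flatten_append,
    List.flatten_cons, List.flatten_nil, List.append_nil]
  exact PySem.Set.ofList_append _ _

lemma cntB_append (res : List Int) (k : Int) (r : Nat) (P : List (Int × List Int))
    (p : Int × List Int) :
    cntB res k r (P ++ [p]) =
      cntB res k r P +
        (if !p.2.isEmpty && decide (k ∈ p.2) && (rOf res p.1 == r) then 1 else 0) := by
  simp only [cntB, List.countP_append, List.countP_cons, List.countP_nil]
  split <;> simp

lemma totB_append (res : List Int) (r : Nat) (P : List (Int × List Int))
    (p : Int × List Int) :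
    totB res r (P ++ [p]) =
      totB res r P + (if !p.2.isEmpty && (rOf res p.1 == r) then 1 else 0) := by
  simp only [totB, List.countP_append, List.countP_cons, List.countP_nil]
  split <;> simp

lemma passB_one (res : List Int) (P : List (Int × List Int)) (p : Int × List Int) :
    (fun (st : PySem.Dict Int (List Int) × List Int) (p : Int × List Int) =>
      if p.2 = [] then st
      else
        let r : Nat := if (PySem.List.pyGet? res p.1).getD 0 ≠ 0 then 1 else 0
        let totals := st.2.set r (st.2.getD r 0 + 1)
        let counts := (PySem.List.dedup p.2).foldl (fun c line =>
          let v := c.getD line [0, 0]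
          c.insert line (v.set r (v.getD r 0 + 1))) st.1
        (counts, totals))
      (cdict (keysB P) (fun k => [cntB res k 0 P, cntB res k 1 P]),
       [totB res 0 P, totB res 1 P]) p
    = (cdict (keysB (P ++ [p])) (fun k => [cntB res k 0 (P ++ [p]), cntB res k 1 (P ++ [p])]),
       [totB res 0 (P ++ [p]), totB res 1 (P ++ [p])]) := by
  by_cases hp : p.2 = []
  · show (if p.2 = [] then _ else _) = _
    rw [if_pos hp]
    have he : p.2.isEmpty = true := by simp [hp]
    have hk : keysB (P ++ [p]) = keysB P := by
      rw [keysB_append_one, hp, PySem.Set.update_nil]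
    refine Prod.ext ?_ ?_
    · show cdict (keysB P) _ = cdict (keysB (P ++ [p])) _
      rw [hk]
      exact cdict_congr (fun k _ => by simp [cntB_append, he])
    · show [totB res 0 P, totB res 1 P] = _
      simp [totB_append, he]
  · have he : p.2.isEmpty = false := by simpa using hp
    show (if p.2 = [] then _ else _) = _
    rw [if_neg hp]
    show ((PySem.List.dedup p.2).foldl (fun c line =>
        c.insert line ((c.getD line [0, 0]).set (rOf res p.1)
          ((c.getD line [0, 0]).getD (rOf res p.1) 0 + 1)))
        (cdict (keysB P) (fun k => [cntB res k 0 P, cntB res k 1 P])),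
      ([totB res 0 P, totB res 1 P]).set (rOf res p.1)
        (([totB res 0 P, totB res 1 P]).getD (rOf res p.1) 0 + 1)) = _
    rw [PySem.List.dedup_eq_ofList,
      foldIns (rOf res p.1) _ _ _ (PySem.Set.nodup_ofList _)]
    refine Prod.ext ?_ ?_
    · show cdict (PySem.Set.update (keysB P) (PySem.Set.ofList p.2)) _
        = cdict (keysB (P ++ [p])) _
      rw [update_ofList, ← keysB_append_one]
      refine cdict_congr (fun k hk => ?_)
      have hbase : (if k ∈ keysB P then [cntB res k 0 P, cntB res k 1 P] else [0, 0])
          = [cntB res k 0 P, cntB res k 1 P] := by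
        split
        · rfl
        · rw [cntB_zero res k 0 P (by assumption), cntB_zero res k 1 P (by assumption)]
      rw [hbase]
      by_cases hm : k ∈ p.2
      · rw [if_pos ((PySem.Set.mem_ofList _ _).mpr hm)]
        rcases rOf_cases res p.1 with hr | hr <;>
          simp [hr, cntB_append, he, hm]
      · rw [if_neg (fun hh => hm ((PySem.Set.mem_ofList _ _).mp hh))]
        simp [cntB_append, he, hm]
    · show ([totB res 0 P, totB res 1 P]).set (rOf res p.1) _ = _
      rcases rOf_cases res p.1 with hr | hr <;>
        simp [hr, totB_append, he]

lemma passB (res : List Int) (L : List (Int × List Int)) :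
    ∀ (P : List (Int × List Int)),
    L.foldl (fun st p =>
      if p.2 = [] then st
      else
        let r : Nat := if (PySem.List.pyGet? res p.1).getD 0 ≠ 0 then 1 else 0
        let totals := st.2.set r (st.2.getD r 0 + 1)
        let counts := (PySem.List.dedup p.2).foldl (fun c line =>
          let v := c.getD line [0, 0]
          c.insert line (v.set r (v.getD r 0 + 1))) st.1
        (counts, totals))
      (cdict (keysB P) (fun k => [cntB res k 0 P, cntB res k 1 P]),
       [totB res 0 P, totB res 1 P])
    = (cdict (keysB (P ++ L)) (fun k => [cntB res k 0 (P ++ L), cntB res k 1 (P ++ L)]),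
       [totB res 0 (P ++ L), totB res 1 (P ++ L)]) := by
  induction L with
  | nil => intro P; simp
  | cons p L ih =>
    intro P
    rw [List.foldl_cons, List.append_cons P p L]
    refine Eq.trans ?_ (ih (P ++ [p]))
    exact congrArg (fun s => List.foldl _ s L) (passB_one res P p)

lemma B_eq (res : List Int) (cov_all : List (List Int)) :
    GetTouleList_alt res cov_all
      = (PySem.Set.ofList cov_all.flatten).map
          (fun k => (k, [cntB res k 0 (PySem.List.enumerate cov_all),
                         cntB res k 1 (PySem.List.enumerate cov_all),
                         totB res 0 (PySem.List.enumerate cov_all) - cntB res k 0 (PySem.List.enumerate cov_all),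
                         totB res 1 (PySem.List.enumerate cov_all) - cntB res k 1 (PySem.List.enumerate cov_all)])) := by
  simp only [GetTouleList_alt]
  have hinit : ((PySem.Dict.mk [] : PySem.Dict Int (List Int)), ([0, 0] : List Int))
      = (cdict (keysB ([] : List (Int × List Int)))
           (fun k => [cntB res k 0 [], cntB res k 1 []]),
         [totB res 0 [], totB res 1 []]) := by
    refine Prod.ext ?_ ?_
    · rfl
    · show ([0, 0] : List Int) = [totB res 0 [], totB res 1 []]
      simp [totB]
  rw [hinit]
  have hfold := passB res (PySem.List.enumerate cov_all) []
  simp only [List.nil_append] at hfold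
  rw [hfold]
  have hkeys : keysB (PySem.List.enumerate cov_all) = PySem.Set.ofList cov_all.flatten := by
    simp only [keysB, PySem.List.map_snd_enumerate]
  show ((keysB (PySem.List.enumerate cov_all)).map
      (fun k => (k, [cntB res k 0 _, cntB res k 1 _]))).map _ = _
  rw [List.map_map, hkeys]
  exact List.map_congr_left (fun k _ => by simp)

lemma valA_eq_B (res : List Int) (k : Int) (P : List (Int × List Int)) :
    valA res k P = [cntB res k 0 P, cntB res k 1 P,
                    totB res 0 P - cntB res k 0 P, totB res 1 P - cntB res k 1 P] := by
  have hin : ∀ r : Nat, r = 0 ∨ r = 1 → cntA res k r P = cntB res k r P := by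
    intro r hr
    simp only [cntA, cntB]
    refine congrArg _ (List.countP_congr (fun p _ => ?_))
    by_cases hm : k ∈ p.2 <;> rcases rOf_cases res p.1 with h0 | h0 <;>
      rcases hr with hr | hr <;> subst hr <;> simp [aOf, hm, h0]
  have hsplit : ∀ r : Nat, cntB res k r P + cntA res k (r + 2) P = totB res r P := by
    intro r
    simp only [cntA, cntB, totB]
    have : ∀ Q : List (Int × List Int),
        Q.countP (fun p => !p.2.isEmpty && decide (k ∈ p.2) && (rOf res p.1 == r)) +
          Q.countP (fun p => !p.2.isEmpty && (aOf res k p == r + 2)) =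
          Q.countP (fun p => !p.2.isEmpty && (rOf res p.1 == r)) := by
      intro Q
      induction Q with
      | nil => simp
      | cons p Q ihq =>
        simp only [List.countP_cons]
        have hcase : (if (!p.2.isEmpty && decide (k ∈ p.2) && (rOf res p.1 == r)) = true then 1 else 0) +
            (if (!p.2.isEmpty && (aOf res k p == r + 2)) = true then 1 else 0) =
            (if (!p.2.isEmpty && (rOf res p.1 == r)) = true then 1 else 0) := by
          by_cases he : p.2.isEmpty
          · simp [he]
          · by_cases hm : k ∈ p.2
            · have ha : aOf res k p = rOf res p.1 := by simp [aOf, hm]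
              have hne : (rOf res p.1 == r + 2) = false := by
                rcases rOf_cases res p.1 with h0 | h0 <;>
                  · simp only [h0, beq_eq_false_iff_ne, ne_eq]; omega
              simp [he, hm, ha, hne]
            · have ha : aOf res k p = rOf res p.1 + 2 := by simp [aOf, hm]
              have hcc : (rOf res p.1 + 2 == r + 2) = (rOf res p.1 == r) := by
                simp
              simp [he, hm, ha, hcc]
        omega
    push_cast [← this P]
    ring
  have h0 := hin 0 (Or.inl rfl)
  have h1 := hin 1 (Or.inr rfl)
  have h2 := hsplit 0
  have h3 := hsplit 1
  simp only [valA]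
  rw [h0, h1]
  norm_num at h2 h3 ⊢
  constructor
  · omega
  · omega

-- ===== VERDICT =====
theorem GetTouleList_spec : Claim_equal_GetTouleList := by
  intro res cov_all _ _
  unfold Spec_GetTouleList
  rw [A_eq, B_eq]
  exact List.map_congr_left (fun k _ => by rw [valA_eq_B])
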